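-- pv_equiv track=rewrite | github.com/nghiatt90/cs-practice | codesignal/longestwordladder.py | longestWordLadder
-- ===== SOURCE A (Python) =====
-- from collections import deque
--
-- def longestWordLadder(s, e, w):
--     def A(x, y):
--         x.append(y)
--     R = range
--     L = len
--
--     w.sort()
--     w = [s] + w + [e]
--     n = len(w)
--
--     s = 0
--     e = n - 1
--     g = {i:[] for i in R(n)}
--
--     for i in R(n):
--         for j in R(i+1, n):
--             if sum(w[i][k] != w[j][k] for k in R(L(w[0]))) == 1:
--                 A(g[i], j)
--                 A(g[j], i)
--
--     S = deque([(0, [])])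
--     r = []
--     while S:
--         v, p = S.pop()
--         if v not in p:
--             if v == e:
--                 if L(r) < L(p) or L(r) == L(p) and p < r:
--                     r = p[:]
--             A(p, v)
--             for x in g[v]:
--                 A(S, (x, p[:]))
--
--     return [w[i] for i in r]+[w[e]] if r else []
-- ===== SOURCE B (Python) =====
-- # Recursive backtracking DFS with neighbor lists computed on the fly (no dict graph,
-- # no explicit deque stack); also sorts the caller's list w in place, like A.
-- def longestWordLadder(s, e, w):
--     w.sort()
--     words = [s] + w + [e]
--     n = len(words)
--     m = len(words[0])
--     end = n - 1
--
--     def neighbors(v):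
--         return [u for u in range(n)
--                 if u != v and sum(1 for k in range(m) if words[v][k] != words[u][k]) == 1]
--
--     best = []
--
--     def dfs(v, path):
--         nonlocal best
--         if v in path:
--             return
--         if v == end:
--             if len(best) < len(path) or (len(best) == len(path) and path < best):
--                 best = path[:]
--         for u in neighbors(v):
--             dfs(u, path + [v])
--
--     dfs(0, [])
--     return [words[i] for i in best] + [words[end]] if best else []
-- ===== Notes on version B (the rewrite author's own statement) =====
-- stated objective: simpler
-- what changed: A precomputes an adjacency dict with a double loop over index pairs and then runs an explicit deque-as-stack loop with copied path frames; B drops both the dict and the stack and does a recursive backtracking DFS whose neighbor list is a single range filter computed on the fly; the result is identical because A's adjacency lists are exactly the ascending-index neighbor filters and the best-path update rule is order-independent.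
import Mathlib
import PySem

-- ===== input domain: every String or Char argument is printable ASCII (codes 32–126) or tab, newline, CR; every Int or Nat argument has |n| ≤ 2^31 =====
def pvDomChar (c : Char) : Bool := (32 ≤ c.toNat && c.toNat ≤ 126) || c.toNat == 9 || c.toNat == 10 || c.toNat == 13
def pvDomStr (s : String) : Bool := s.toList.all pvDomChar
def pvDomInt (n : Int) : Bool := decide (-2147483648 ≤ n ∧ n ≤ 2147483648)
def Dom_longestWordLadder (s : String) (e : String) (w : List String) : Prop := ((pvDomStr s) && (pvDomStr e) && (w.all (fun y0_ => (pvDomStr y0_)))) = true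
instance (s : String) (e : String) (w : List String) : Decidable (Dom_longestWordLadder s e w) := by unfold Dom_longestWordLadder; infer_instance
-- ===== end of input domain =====

-- B replaces A's precomputed adjacency dict and explicit deque stack with a recursive
-- backtracking DFS whose neighbor list is a range filter computed on the fly; equivalence
-- is about the RETURN value — both Pythons also sort the caller's list `w` in place.

-- ===== PORT A =====
-- helper: Python's `p < r` on lists of ints
def lwlLt (a b : List Int) : Bool := decide (a < b)

-- A's graph construction: dict of empty lists, then a double loop over index pairs
def lwlGraph (W : List String) : PySem.Dict Int (List Int) :=
  (PySem.List.pyRange 0 (W.length : Int) 1).foldl (fun d i =>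
    (PySem.List.pyRange (i + 1) (W.length : Int) 1).foldl (fun d j =>
      if ((PySem.List.pyRange 0 ((PySem.Str.len (PySem.List.pyGetD W 0 "")) : Int) 1).map
            (fun k => if PySem.Str.pyGet? (PySem.List.pyGetD W i "") k ≠ PySem.Str.pyGet? (PySem.List.pyGetD W j "") k then (1 : Int) else 0)).sum = 1
      then (d.modify i [] (fun l => l ++ [j])).modify j [] (fun l => l ++ [i])
      else d) d)
    ((PySem.List.pyRange 0 (W.length : Int) 1).foldl (fun d i => d.insert i [])
      (PySem.Dict.empty : PySem.Dict Int (List Int)))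

-- fuel bound for port A's while-loop (a totality guard only; proved sufficient below)
def lwlDictSize (g : PySem.Dict Int (List Int)) : Nat := (g.values.map List.length).sum

-- A's while-loop over the explicit stack (deque.pop = take from the right end)
def lwlLoopA (g : PySem.Dict Int (List Int)) (eIdx : Int) :
    Nat → List (Int × List Int) → List Int → Option (List Int)
  | 0, _, _ => none
  | f + 1, S, r =>
    match S.getLast? with
    | none => some r
    | some (v, p) =>
      if v ∈ p then lwlLoopA g eIdx f S.dropLast r
      else lwlLoopA g eIdx f (S.dropLast ++ (g.getD v []).map (fun x => (x, p ++ [v])))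
        (if v = eIdx then (if r.length < p.length ∨ (r.length = p.length ∧ lwlLt p r = true) then p else r) else r)

def longestWordLadder (s : String) (e : String) (w : List String) : List String :=
  let W := [s] ++ PySem.List.sorted w (fun x => x) false ++ [e]
  let g := lwlGraph W
  match lwlLoopA g ((W.length : Int) - 1) ((lwlDictSize g + 2) ^ (W.length + 2)) [((0 : Int), ([] : List Int))] [] with
  | some r => if r ≠ [] then r.map (fun i => PySem.List.pyGetD W i "") ++ [PySem.List.pyGetD W ((W.length : Int) - 1) ""] else []
  | none => []   -- unreachable: the fuel bound is proved sufficient below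

-- ===== PORT B =====
-- B's neighbor list: a single filter over the vertex range, computed on demand
def lwlNbrs (W : List String) (v : Int) : List Int :=
  (PySem.List.pyRange 0 (W.length : Int) 1).filter (fun u =>
    decide (u ≠ v ∧
      (PySem.List.pyRange 0 ((PySem.Str.len (PySem.List.pyGetD W 0 "")) : Int) 1).countP
        (fun k => decide (PySem.Str.pyGet? (PySem.List.pyGetD W v "") k ≠ PySem.Str.pyGet? (PySem.List.pyGetD W u "") k)) = 1))

-- B's recursive backtracking DFS, threading the best-path accumulator
def lwlDfsB (W : List String) (eIdx : Int) :
    Nat → Int → List Int → List Int → Option (List Int)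
  | 0, _, _, _ => none
  | f + 1, v, path, best =>
    if v ∈ path then some best
    else
      (lwlNbrs W v).foldl (fun acc u => acc.bind (fun b => lwlDfsB W eIdx f u (path ++ [v]) b))
        (some (if v = eIdx then (if best.length < path.length ∨ (best.length = path.length ∧ path < best) then path else best) else best))

def longestWordLadder_alt (s : String) (e : String) (w : List String) : List String :=
  let W := [s] ++ PySem.List.sorted w (fun x => x) false ++ [e]
  match lwlDfsB W ((W.length : Int) - 1) (W.length + 2) 0 [] [] with
  | some best => if best ≠ [] then best.map (fun i => PySem.List.pyGetD W i "") ++ [PySem.List.pyGetD W ((W.length : Int) - 1) ""] else []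
  | none => []   -- unreachable: the recursion depth never exceeds W.length + 1

-- ===== PRECONDITION & SPEC =====
-- Pre_ excludes exactly the inputs where Python A raises IndexError: some word (or e)
-- shorter than s, which gets indexed at s's positions during the pairwise comparison.
def Pre_longestWordLadder (s : String) (e : String) (w : List String) : Prop :=
  PySem.Str.len s ≤ PySem.Str.len e ∧ ∀ x ∈ w, PySem.Str.len s ≤ PySem.Str.len x
instance (s : String) (e : String) (w : List String) : Decidable (Pre_longestWordLadder s e w) := by
  unfold Pre_longestWordLadder; infer_instance

def pvWitness_longestWordLadder : String × String × List String := ("hit", "cog", ["hot", "dot"])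

def Spec_longestWordLadder (s : String) (e : String) (w : List String) (out : List String) : Prop := out = longestWordLadder_alt s e w
instance (s : String) (e : String) (w : List String) (out : List String) : Decidable (Spec_longestWordLadder s e w out) := by unfold Spec_longestWordLadder; infer_instance

-- ===== CLAIM (what is proved, stated in full; the proofs are below) =====
def Claim_equal_longestWordLadder : Prop := ∀ (s : String) (e : String) (w : List String), Dom_longestWordLadder s e w → Pre_longestWordLadder s e w → Spec_longestWordLadder s e w (longestWordLadder s e w)

-- ===== LEMMAS AND PROOFS =====

-- the update rule both programs apply to the best-path accumulator
def lwlUpd (r c : List Int) : List Int :=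
  if r.length < c.length ∨ (r.length = c.length ∧ lwlLt c r = true) then c else r

-- "candidate c replaces the current best r"
def lwlB (c r : List Int) : Prop := r.length < c.length ∨ (r.length = c.length ∧ c < r)

lemma lwlUpd_pos {r c : List Int} (h : lwlB c r) : lwlUpd r c = c := by
  unfold lwlUpd
  rw [if_pos (by simpa [lwlLt] using h)]

lemma lwlUpd_neg {r c : List Int} (h : ¬ lwlB c r) : lwlUpd r c = r := by
  unfold lwlUpd
  rw [if_neg (fun hc => h (by simpa [lwlLt] using hc))]

lemma lwlB_trans {a b c : List Int} (h1 : lwlB a b) (h2 : lwlB b c) : lwlB a c := by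
  rcases h1 with h1 | ⟨h1, h1'⟩ <;> rcases h2 with h2 | ⟨h2, h2'⟩
  · exact Or.inl (by omega)
  · exact Or.inl (by omega)
  · exact Or.inl (by omega)
  · exact Or.inr ⟨by omega, lt_trans h1' h2'⟩

lemma lwlB_irrefl (a : List Int) : ¬ lwlB a a := by
  rintro (h | ⟨-, h⟩)
  · omega
  · exact lt_irrefl _ h

lemma lwlB_conn {a b : List Int} (h1 : ¬ lwlB a b) (h2 : ¬ lwlB b a) : a = b := by
  rw [lwlB, not_or] at h1 h2
  have hl : a.length = b.length := by omega
  have ha : ¬ a < b := fun h => h1.2 ⟨hl.symm, h⟩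
  have hb : ¬ b < a := fun h => h2.2 ⟨hl, h⟩
  exact le_antisymm (not_lt.mp hb) (not_lt.mp ha)

lemma lwlUpd_comm (r a b : List Int) : lwlUpd (lwlUpd r a) b = lwlUpd (lwlUpd r b) a := by
  by_cases har : lwlB a r <;> by_cases hbr : lwlB b r
  · rw [lwlUpd_pos har, lwlUpd_pos hbr]
    by_cases hba : lwlB b a
    · have hab : ¬ lwlB a b := fun hab => lwlB_irrefl _ (lwlB_trans hab hba)
      rw [lwlUpd_pos hba, lwlUpd_neg hab]
    · by_cases hab : lwlB a b
      · rw [lwlUpd_neg hba, lwlUpd_pos hab]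
      · rw [lwlUpd_neg hba, lwlUpd_neg hab]
        exact lwlB_conn hab hba
  · have hba : ¬ lwlB b a := fun h => hbr (lwlB_trans h har)
    rw [lwlUpd_pos har, lwlUpd_neg hba, lwlUpd_neg hbr, lwlUpd_pos har]
  · have hab : ¬ lwlB a b := fun h => har (lwlB_trans h hbr)
    rw [lwlUpd_neg har, lwlUpd_pos hbr, lwlUpd_neg hab]
  · rw [lwlUpd_neg har, lwlUpd_neg hbr, lwlUpd_neg har]

-- ---------- characterizing A's adjacency dict ----------

-- A's edge condition between indices i and j (the inline sum test of lwlGraph)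
def lwlEB (W : List String) (i j : Int) : Bool :=
  decide (((PySem.List.pyRange 0 ((PySem.Str.len (PySem.List.pyGetD W 0 "")) : Int) 1).map
    (fun k => if PySem.Str.pyGet? (PySem.List.pyGetD W i "") k ≠ PySem.Str.pyGet? (PySem.List.pyGetD W j "") k then (1 : Int) else 0)).sum = 1)

-- the (source, target) pairs A's double loop appends, in append order
def lwlPairs (W : List String) : List (Int × Int) :=
  (PySem.List.pyRange 0 (W.length : Int) 1).flatMap (fun i =>
    (PySem.List.pyRange (i + 1) (W.length : Int) 1).flatMap (fun j =>
      if lwlEB W i j then [(i, j), (j, i)] else []))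

def lwlD0 (W : List String) : PySem.Dict Int (List Int) :=
  (PySem.List.pyRange 0 (W.length : Int) 1).foldl (fun d i => d.insert i [])
    (PySem.Dict.empty : PySem.Dict Int (List Int))

lemma lwlGraph_pairs (W : List String) :
    lwlGraph W = (lwlPairs W).foldl (fun d p => d.modify p.1 [] (fun l => l ++ [p.2])) (lwlD0 W) := by
  unfold lwlGraph lwlPairs lwlD0
  rw [List.foldl_flatMap]
  apply PySem.List.foldl_congr_mem
  intro d i _
  rw [List.foldl_flatMap]
  apply PySem.List.foldl_congr_mem
  intro d' j _
  by_cases hE : lwlEB W i j = true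
  · rw [if_pos (of_decide_eq_true (by simpa [lwlEB] using hE)), if_pos hE]; rfl
  · rw [if_neg (fun h => hE (by simpa [lwlEB] using decide_eq_true h)), if_neg hE]; rfl

lemma lwlD0_getD (W : List String) (v : Int) : (lwlD0 W).getD v [] = [] := by
  unfold lwlD0
  refine List.foldlRecOn
    (motive := fun (d : PySem.Dict Int (List Int)) => d.getD v [] = [])
    _ _ (by simp [PySem.Dict.getD_empty]) ?_
  intro d hd i _
  rw [PySem.Dict.getD_insert]
  split <;> simp [hd]

lemma lwlGraph_getD (W : List String) (v : Int) :
    (lwlGraph W).getD v [] = ((lwlPairs W).filter (fun p => p.1 == v)).map (fun p => p.2) := by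
  rw [lwlGraph_pairs, PySem.Dict.getD_foldl_modify_append, lwlD0_getD]
  simp

lemma lwlPairs_mem (W : List String) {p : Int × Int} (hp : p ∈ lwlPairs W) :
    p.1 ∈ PySem.List.pyRange 0 (W.length : Int) 1 ∧ p.2 ∈ PySem.List.pyRange 0 (W.length : Int) 1 := by
  unfold lwlPairs at hp
  rw [List.mem_flatMap] at hp
  obtain ⟨i, hi, hp⟩ := hp
  rw [List.mem_flatMap] at hp
  obtain ⟨j, hj, hp⟩ := hp
  rw [PySem.List.mem_pyRange_one] at hi hj
  have hi' : i ∈ PySem.List.pyRange 0 (W.length : Int) 1 := by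
    rw [PySem.List.mem_pyRange_one]; omega
  have hj' : j ∈ PySem.List.pyRange 0 (W.length : Int) 1 := by
    rw [PySem.List.mem_pyRange_one]; omega
  split at hp
  · simp only [List.mem_cons, List.not_mem_nil, or_false] at hp
    rcases hp with rfl | rfl
    · exact ⟨hi', hj'⟩
    · exact ⟨hj', hi'⟩
  · cases hp

lemma lwlGraph_sub (W : List String) (v u : Int) (hu : u ∈ (lwlGraph W).getD v []) :
    u ∈ PySem.List.pyRange 0 (W.length : Int) 1 := by
  rw [lwlGraph_getD] at hu
  rw [List.mem_map] at hu
  obtain ⟨p, hp, rfl⟩ := hu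
  exact (lwlPairs_mem W (List.mem_of_mem_filter hp)).2

-- splitting a unit-step range
lemma lwlRange_split (a b c : Int) (h1 : a ≤ b) (h2 : b ≤ c) :
    PySem.List.pyRange a c 1 = PySem.List.pyRange a b 1 ++ PySem.List.pyRange b c 1 := by
  rw [PySem.List.pyRange_one, PySem.List.pyRange_one, PySem.List.pyRange_one]
  have hca : (c - a).toNat = (b - a).toNat + (c - b).toNat := by omega
  rw [hca, List.range_add, List.map_append, List.map_map]
  congr 1
  apply List.map_congr_left
  intro k _
  simp only [Function.comp_apply]
  omega

lemma lwlFlatMap_single {l : List Int} (hl : l.Nodup) (v : Int) (c : Int → List Int) :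
    l.flatMap (fun j => if j = v then c j else []) = if v ∈ l then c v else [] := by
  induction l with
  | nil => simp
  | cons a t ih =>
    rcases List.nodup_cons.mp hl with ⟨hat, hndt⟩
    rw [List.flatMap_cons, ih hndt]
    by_cases hav : a = v
    · subst hav
      simp [hat]
    · by_cases hvt : v ∈ t <;> simp [hav, hvt, Ne.symm hav]

lemma lwlFlatMap_filter {l : List Int} (p : Int → Bool) :
    l.flatMap (fun j => if p j then [j] else []) = l.filter p := by
  induction l with
  | nil => simp
  | cons a t ih =>
    rw [List.flatMap_cons, ih]
    by_cases h : p a <;> simp [h]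

-- A's edge test is symmetric and is B's char-difference count
lemma lwlEB_symm (W : List String) (i j : Int) : lwlEB W i j = lwlEB W j i := by
  unfold lwlEB
  have h : (fun k => if PySem.Str.pyGet? (PySem.List.pyGetD W i "") k ≠ PySem.Str.pyGet? (PySem.List.pyGetD W j "") k then (1 : Int) else 0)
      = (fun k => if PySem.Str.pyGet? (PySem.List.pyGetD W j "") k ≠ PySem.Str.pyGet? (PySem.List.pyGetD W i "") k then (1 : Int) else 0) := by
    funext k
    exact if_congr ne_comm rfl rfl
  rw [h]

lemma lwlEB_countP (W : List String) (i j : Int) :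
    lwlEB W i j = decide
      ((PySem.List.pyRange 0 ((PySem.Str.len (PySem.List.pyGetD W 0 "")) : Int) 1).countP
        (fun k => decide (PySem.Str.pyGet? (PySem.List.pyGetD W i "") k ≠ PySem.Str.pyGet? (PySem.List.pyGetD W j "") k)) = 1) := by
  unfold lwlEB
  rw [decide_eq_decide]
  have h : (fun k => if PySem.Str.pyGet? (PySem.List.pyGetD W i "") k ≠ PySem.Str.pyGet? (PySem.List.pyGetD W j "") k then (1 : Int) else 0)
      = (fun k => if (fun k => decide (PySem.Str.pyGet? (PySem.List.pyGetD W i "") k ≠ PySem.Str.pyGet? (PySem.List.pyGetD W j "") k)) k = true then (1 : Int) else 0) := by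
    funext k
    by_cases hk : PySem.Str.pyGet? (PySem.List.pyGetD W i "") k ≠ PySem.Str.pyGet? (PySem.List.pyGetD W j "") k
    · rw [if_pos hk, if_pos (decide_eq_true hk)]
    · rw [if_neg hk, if_neg (by simpa using hk)]
  rw [h, PySem.List.sum_map_ite_one_zero]
  omega

-- A's adjacency list at an in-range vertex IS B's neighbor filter
lemma lwlGraph_nbrs (W : List String) (v : Int)
    (hv : v ∈ PySem.List.pyRange 0 (W.length : Int) 1) :
    (lwlGraph W).getD v [] = lwlNbrs W v := by
  rw [PySem.List.mem_pyRange_one] at hv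
  have hsplitA : PySem.List.pyRange 0 (W.length : Int) 1
      = PySem.List.pyRange 0 v 1 ++ PySem.List.pyRange v (W.length : Int) 1 :=
    lwlRange_split 0 v _ hv.1 (le_of_lt hv.2)
  have hcons : PySem.List.pyRange v (W.length : Int) 1 = v :: PySem.List.pyRange (v + 1) (W.length : Int) 1 :=
    PySem.List.pyRange_one_cons hv.2
  -- A side
  rw [lwlGraph_getD]
  unfold lwlPairs
  rw [List.filter_flatMap, List.map_flatMap, hsplitA, hcons, List.flatMap_append, List.flatMap_cons]
  have hinner : ∀ i : Int,
      (List.map (fun p => p.2) (List.filter (fun p => p.1 == v)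
        ((PySem.List.pyRange (i + 1) (W.length : Int) 1).flatMap (fun j => if lwlEB W i j then [(i, j), (j, i)] else []))))
      = (PySem.List.pyRange (i + 1) (W.length : Int) 1).flatMap (fun j =>
          if lwlEB W i j then ((if i = v then [j] else []) ++ (if j = v then [i] else [])) else []) := by
    intro i
    rw [List.filter_flatMap, List.map_flatMap]
    apply List.flatMap_congr
    intro j _
    by_cases hE : lwlEB W i j = true
    · rw [if_pos hE, if_pos hE]
      by_cases hi : i = v <;> by_cases hj : j = v <;> simp [hi, hj]
    · rw [if_neg hE, if_neg hE]
      simp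
  -- part 1: i < v contributes [i] when lwlE W i v
  have hpart1 : (PySem.List.pyRange 0 v 1).flatMap (fun i =>
      List.map (fun p => p.2) (List.filter (fun p => p.1 == v)
        ((PySem.List.pyRange (i + 1) (W.length : Int) 1).flatMap (fun j => if lwlEB W i j then [(i, j), (j, i)] else []))))
      = (PySem.List.pyRange 0 v 1).filter (fun i => lwlEB W i v) := by
    rw [← lwlFlatMap_filter (fun i => lwlEB W i v)]
    apply List.flatMap_congr
    intro i hi
    rw [PySem.List.mem_pyRange_one] at hi
    rw [hinner i]
    have hne : i ≠ v := by omega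
    have h1 : (PySem.List.pyRange (i + 1) (W.length : Int) 1).flatMap (fun j =>
        if lwlEB W i j then ((if i = v then [j] else []) ++ (if j = v then [i] else [])) else [])
        = (PySem.List.pyRange (i + 1) (W.length : Int) 1).flatMap (fun j =>
            if j = v then (if lwlEB W i v then [i] else []) else []) := by
      apply List.flatMap_congr
      intro j _
      by_cases hj : j = v
      · subst hj; by_cases hE : lwlEB W i j = true <;> simp [hE, hne]
      · by_cases hE : lwlEB W i j = true <;> simp [hE, hne, hj]
    rw [h1, lwlFlatMap_single (PySem.List.nodup_pyRange_one _ _)]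
    rw [if_pos (by rw [PySem.List.mem_pyRange_one]; omega)]
  -- part 2: i = v contributes the filter of larger indices
  have hpart2 : List.map (fun p => p.2) (List.filter (fun p => p.1 == v)
      ((PySem.List.pyRange (v + 1) (W.length : Int) 1).flatMap (fun j => if lwlEB W v j then [(v, j), (j, v)] else [])))
      = (PySem.List.pyRange (v + 1) (W.length : Int) 1).filter (fun j => lwlEB W v j) := by
    rw [hinner v, ← lwlFlatMap_filter (fun j => lwlEB W v j)]
    apply List.flatMap_congr
    intro j hj
    rw [PySem.List.mem_pyRange_one] at hj
    have hne : j ≠ v := by omega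
    by_cases hE : lwlEB W v j = true <;> simp [hE, hne]
  -- part 3: i > v contributes nothing
  have hpart3 : (PySem.List.pyRange (v + 1) (W.length : Int) 1).flatMap (fun i =>
      List.map (fun p => p.2) (List.filter (fun p => p.1 == v)
        ((PySem.List.pyRange (i + 1) (W.length : Int) 1).flatMap (fun j => if lwlEB W i j then [(i, j), (j, i)] else []))))
      = [] := by
    rw [List.flatMap_eq_nil_iff]
    intro i hi
    rw [PySem.List.mem_pyRange_one] at hi
    rw [hinner i]
    rw [List.flatMap_eq_nil_iff]
    intro j hj
    rw [PySem.List.mem_pyRange_one] at hj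
    have h1 : i ≠ v := by omega
    have h2 : j ≠ v := by omega
    by_cases hE : lwlEB W i j = true <;> simp [hE, h1, h2]
  rw [hpart1, hpart2, hpart3, List.append_nil]
  -- B side
  unfold lwlNbrs
  rw [hsplitA, hcons, List.filter_append, List.filter_cons]
  have hBv : (decide (v ≠ v ∧
      (PySem.List.pyRange 0 ((PySem.Str.len (PySem.List.pyGetD W 0 "")) : Int) 1).countP
        (fun k => decide (PySem.Str.pyGet? (PySem.List.pyGetD W v "") k ≠ PySem.Str.pyGet? (PySem.List.pyGetD W v "") k)) = 1)) = false := by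
    simp
  rw [hBv]
  simp only [Bool.false_eq_true, if_false]
  congr 1
  · apply List.filter_congr
    intro u hu
    rw [PySem.List.mem_pyRange_one] at hu
    have hne : u ≠ v := by omega
    rw [lwlEB_symm, lwlEB_countP, decide_eq_decide]
    exact (and_iff_right hne).symm
  · apply List.filter_congr
    intro u hu
    rw [PySem.List.mem_pyRange_one] at hu
    have hne : u ≠ v := by omega
    rw [lwlEB_countP, decide_eq_decide]
    exact (and_iff_right hne).symm

-- B's neighbor lists stay inside the vertex range
lemma lwlNbrs_sub (W : List String) (v u : Int) (hu : u ∈ lwlNbrs W v) :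
    u ∈ PySem.List.pyRange 0 (W.length : Int) 1 :=
  List.mem_of_mem_filter hu

-- ---------- the candidate-path multiset recorded by a DFS ----------

-- number of graph vertices not yet on the path
def lwlRem (n : Int) (p : List Int) : Nat :=
  ((PySem.List.pyRange 0 n 1).filter (fun x => decide (x ∉ p))).length

lemma lwlRem_nil (n : Int) : lwlRem n [] = n.toNat := by
  simp [lwlRem, PySem.List.length_pyRange_one]

lemma lwl_length_filter_erase {α : Type} [DecidableEq α] (q : α → Bool) (v : α) (hq : q v = true) :
    ∀ (l : List α), l.Nodup → v ∈ l →
      (l.filter (fun x => q x && !decide (x = v))).length + 1 = (l.filter q).length := by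
  intro l
  induction l with
  | nil => intro _ h; cases h
  | cons a t ih =>
    intro hnd hv
    rcases List.nodup_cons.mp hnd with ⟨hat, hndt⟩
    by_cases hav : a = v
    · subst hav
      have ht : t.filter (fun x => q x && !decide (x = a)) = t.filter q := by
        apply List.filter_congr
        intro x hx
        have hxa : x ≠ a := fun h => hat (h ▸ hx)
        simp [hxa]
      simp [hq, ht]
    · have hvt : v ∈ t := by
        rcases hv with _ | h
        · exact absurd rfl hav
        · assumption
      by_cases hqa : q a = true
      · have h1 : List.filter (fun x => q x && !decide (x = v)) (a :: t)
            = a :: List.filter (fun x => q x && !decide (x = v)) t := by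
          simp [hqa, hav]
        have h2 : List.filter q (a :: t) = a :: List.filter q t := by
          simp [hqa]
        rw [h1, h2]
        simp only [List.length_cons]
        have := ih hndt hvt
        omega
      · have hqa' : q a = false := by simpa using hqa
        have h1 : List.filter (fun x => q x && !decide (x = v)) (a :: t)
            = List.filter (fun x => q x && !decide (x = v)) t := by
          simp [hqa']
        have h2 : List.filter q (a :: t) = List.filter q t := by
          simp [hqa']
        rw [h1, h2]
        exact ih hndt hvt

lemma lwlRem_append (n : Int) (p : List Int) {v : Int} (hv : v ∈ PySem.List.pyRange 0 n 1)
    (hvp : v ∉ p) : lwlRem n (p ++ [v]) + 1 = lwlRem n p := by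
  unfold lwlRem
  have hpred : ∀ x ∈ PySem.List.pyRange 0 n 1,
      (decide (x ∉ p ++ [v])) = ((fun y => decide (y ∉ p)) x && !decide (x = v)) := by
    intro x _
    by_cases h1 : x = v <;> by_cases h2 : x ∈ p <;> simp [h1, h2]
  rw [List.filter_congr hpred]
  exact lwl_length_filter_erase (fun y => decide (y ∉ p)) v (by simpa using hvp)
    (PySem.List.pyRange 0 n 1) (PySem.List.nodup_pyRange_one _ _) hv

-- the multiset of candidate paths a DFS from (v, p) records, children taken in `adj` order
def lwlCands (adj : Int → List Int) (e : Int) : Nat → Int → List Int → List (List Int)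
  | 0, _, _ => []
  | f + 1, v, p =>
    if v ∈ p then []
    else (if v = e then [p] else []) ++ (adj v).flatMap (fun u => lwlCands adj e f u (p ++ [v]))

lemma lwlCands_succ (adj : Int → List Int) (e : Int) (f : Nat) (v : Int) (p : List Int)
    (hvp : v ∉ p) :
    lwlCands adj e (f + 1) v p
      = (if v = e then [p] else []) ++ (adj v).flatMap (fun u => lwlCands adj e f u (p ++ [v])) := by
  simp [lwlCands, hvp]

lemma lwlCands_fuel (adj : Int → List Int) (e n : Int)
    (hsub : ∀ v u, u ∈ adj v → u ∈ PySem.List.pyRange 0 n 1) :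
    ∀ f1 f2 v p, v ∈ PySem.List.pyRange 0 n 1 → lwlRem n p < f1 → lwlRem n p < f2 →
      lwlCands adj e f1 v p = lwlCands adj e f2 v p := by
  intro f1
  induction f1 with
  | zero => intro f2 v p _ h1 _; exact absurd h1 (Nat.not_lt_zero _)
  | succ a ih =>
    intro f2 v p hv h1 h2
    match f2, h2 with
    | b + 1, h2 =>
      simp only [lwlCands]
      by_cases hvp : v ∈ p
      · simp [hvp]
      · simp only [if_neg hvp]
        congr 1
        have hrem := lwlRem_append n p hv hvp
        apply List.flatMap_congr
        intro u hu
        exact ih b u (p ++ [v]) (hsub v u hu) (by omega) (by omega)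

lemma lwlCands_perm (adj : Int → List Int) (e : Int) :
    ∀ f v p, (lwlCands (fun v => (adj v).reverse) e f v p).Perm (lwlCands adj e f v p) := by
  intro f
  induction f with
  | zero => intro v p; simp [lwlCands]
  | succ a ih =>
    intro v p
    simp only [lwlCands]
    by_cases hvp : v ∈ p
    · simp [hvp]
    · simp only [if_neg hvp]
      apply List.Perm.append_left
      exact (List.Perm.flatMap_left _ (fun u _ => ih u (p ++ [v]))).trans
        (List.Perm.flatMap_right _ (List.reverse_perm (adj v)))

-- two adjacency maps that agree on the vertex range generate the same candidates
lemma lwlCands_congr (adj1 adj2 : Int → List Int) (e n : Int)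
    (hagree : ∀ v, v ∈ PySem.List.pyRange 0 n 1 → adj1 v = adj2 v)
    (hsub : ∀ v u, u ∈ adj2 v → u ∈ PySem.List.pyRange 0 n 1) :
    ∀ f v p, v ∈ PySem.List.pyRange 0 n 1 →
      lwlCands adj1 e f v p = lwlCands adj2 e f v p := by
  intro f
  induction f with
  | zero => intro v p _; simp [lwlCands]
  | succ a ih =>
    intro v p hv
    simp only [lwlCands]
    by_cases hvp : v ∈ p
    · simp [hvp]
    · simp only [if_neg hvp]
      congr 1
      rw [hagree v hv]
      apply List.flatMap_congr
      intro u hu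
      exact ih u (p ++ [v]) (hsub v u hu)

lemma lwlFold_bind (W : List String) (e n : Int) (f : Nat) (p1 : List Int)
    (h : ∀ u b, u ∈ PySem.List.pyRange 0 n 1 →
      lwlDfsB W e f u p1 b = some ((lwlCands (lwlNbrs W) e f u p1).foldl lwlUpd b)) :
    ∀ (l : List Int), (∀ u ∈ l, u ∈ PySem.List.pyRange 0 n 1) → ∀ (b : List Int),
      l.foldl (fun acc u => acc.bind (fun x => lwlDfsB W e f u p1 x)) (some b)
        = some ((l.flatMap (fun u => lwlCands (lwlNbrs W) e f u p1)).foldl lwlUpd b) := by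
  intro l
  induction l with
  | nil => intro _ b; simp
  | cons x t ih =>
    intro hl b
    rw [List.foldl_cons,
      show ((some b).bind fun x_1 => lwlDfsB W e f x p1 x_1) =
        some ((lwlCands (lwlNbrs W) e f x p1).foldl lwlUpd b) by
          simp [h x b (hl x (List.mem_cons_self))],
      ih (fun u hu => hl u (List.mem_cons_of_mem _ hu)), List.flatMap_cons, List.foldl_append]

-- B's fueled DFS computes the fold of the update rule over its candidate list
lemma lwlDfsB_eq (W : List String) (e : Int) :
    ∀ f v p r, v ∈ PySem.List.pyRange 0 (W.length : Int) 1 →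
      lwlRem (W.length : Int) p < f →
      lwlDfsB W e f v p r = some ((lwlCands (lwlNbrs W) e f v p).foldl lwlUpd r) := by
  intro f
  induction f with
  | zero => intro v p r _ h; exact absurd h (Nat.not_lt_zero _)
  | succ a ih =>
    intro v p r hv h
    simp only [lwlDfsB, lwlCands]
    by_cases hvp : v ∈ p
    · simp [hvp]
    · simp only [if_neg hvp]
      have hrem := lwlRem_append (W.length : Int) p hv hvp
      rw [lwlFold_bind W e (W.length : Int) a (p ++ [v])
        (fun u b hu => ih u (p ++ [v]) b hu (by omega))
        _ (fun u hu => lwlNbrs_sub W v u hu)]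
      congr 1
      rw [List.foldl_append]
      congr 1
      by_cases hve : v = e <;> simp [hve, lwlUpd, lwlLt]

def lwlMsr (n : Int) (C : Nat) (S : List (Int × List Int)) : Nat :=
  (S.map (fun fr => (C + 1) ^ (lwlRem n fr.2))).sum

lemma lwl_sum_map_const {α : Type} (l : List α) (c : Nat) :
    (l.map (fun _ => c)).sum = l.length * c := by
  induction l with
  | nil => simp
  | cons x t _ => simp; ring

lemma lwlFoldr_children (A : Int → List Int) (e n : Int) :
    ∀ (l : List Int) (p1 acc : List Int),
      List.foldr (fun fr acc => (lwlCands A e (lwlRem n fr.2 + 1) fr.1 fr.2).foldl lwlUpd acc) acc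
          (l.map (fun x => (x, p1)))
        = (l.reverse.flatMap (fun u => lwlCands A e (lwlRem n p1 + 1) u p1)).foldl lwlUpd acc := by
  intro l
  induction l with
  | nil => intro p1 acc; simp
  | cons x t ih =>
    intro p1 acc
    simp only [List.map_cons, List.foldr_cons, ih, List.reverse_cons, List.flatMap_append,
      List.flatMap_cons, List.flatMap_nil, List.append_nil, List.foldl_append]

-- A's fueled stack loop folds, frame by frame from the top, the same per-frame DFS
-- with each child list reversed (deque.pop takes the most recently pushed frame first)
lemma lwlLoopA_eq (g : PySem.Dict Int (List Int)) (e n : Int) (C : Nat)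
    (hC : ∀ v, (g.getD v []).length ≤ C)
    (hsub : ∀ v u, u ∈ g.getD v [] → u ∈ PySem.List.pyRange 0 n 1) :
    ∀ f S r, (∀ fr ∈ S, fr.1 ∈ PySem.List.pyRange 0 n 1) → lwlMsr n C S < f →
      lwlLoopA g e f S r = some (S.foldr
        (fun fr acc => (lwlCands (fun v => (g.getD v []).reverse) e (lwlRem n fr.2 + 1) fr.1 fr.2).foldl lwlUpd acc) r) := by
  intro f
  induction f with
  | zero => intro S r _ h; exact absurd h (Nat.not_lt_zero _)
  | succ a ih =>
    intro S r hS h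
    rcases List.eq_nil_or_concat S with rfl | ⟨S1, ⟨v, p⟩, rfl⟩
    · simp [lwlLoopA]
    · simp only [List.concat_eq_append] at h hS ⊢
      have hv : v ∈ PySem.List.pyRange 0 n 1 := hS (v, p) (by simp)
      have hS1 : ∀ fr ∈ S1, fr.1 ∈ PySem.List.pyRange 0 n 1 :=
        fun fr hfr => hS fr (List.mem_append_left _ hfr)
      have hmsr : lwlMsr n C (S1 ++ [(v, p)]) = lwlMsr n C S1 + (C + 1) ^ (lwlRem n p) := by
        simp [lwlMsr]
      have hpow1 : 1 ≤ (C + 1) ^ (lwlRem n p) := Nat.one_le_pow _ _ (by omega)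
      simp only [lwlLoopA, List.getLast?_concat, List.dropLast_concat]
      rw [List.foldr_append]
      simp only [List.foldr_cons, List.foldr_nil]
      by_cases hvp : v ∈ p
      · simp only [if_pos hvp]
        rw [ih S1 _ hS1 (by omega)]
        congr 1
        congr 1
        simp [lwlCands, hvp]
      · simp only [if_neg hvp]
        have hrem := lwlRem_append n p hv hvp
        have hlen := hC v
        have hconst : (List.map ((fun fr => (C + 1) ^ lwlRem n fr.2) ∘ fun x => (x, p ++ [v]))
              (g.getD v [])).sum
            = (g.getD v []).length * (C + 1) ^ lwlRem n (p ++ [v]) := by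
          rw [show ((fun (fr : Int × List Int) => (C + 1) ^ lwlRem n fr.2) ∘ fun x => (x, p ++ [v]))
              = (fun (_ : Int) => (C + 1) ^ lwlRem n (p ++ [v])) from rfl]
          exact lwl_sum_map_const _ _
        have hmsr2 : lwlMsr n C (S1 ++ (g.getD v []).map fun x => (x, p ++ [v]))
            ≤ lwlMsr n C S1 + C * (C + 1) ^ (lwlRem n (p ++ [v])) := by
          simp only [lwlMsr, List.map_append, List.sum_append, List.map_map]
          rw [hconst]
          have hmul := Nat.mul_le_mul_right ((C + 1) ^ lwlRem n (p ++ [v])) hlen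
          omega
        have hpows : (C + 1) ^ (lwlRem n p) = (C + 1) ^ (lwlRem n (p ++ [v])) * (C + 1) := by
          rw [← hrem, pow_succ]
        have hpow2 : 1 ≤ (C + 1) ^ (lwlRem n (p ++ [v])) := Nat.one_le_pow _ _ (by omega)
        rw [ih _ _ (by
            intro fr hfr
            rcases List.mem_append.mp hfr with hfr | hfr
            · exact hS1 fr hfr
            · rcases List.mem_map.mp hfr with ⟨x, hx, rfl⟩
              exact hsub v x hx)
          (by
            rw [hmsr] at h
            set x := (C + 1) ^ (lwlRem n (p ++ [v]))
            rw [hpows] at h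
            have hcx : C * x + x = x * (C + 1) := by ring
            omega)]
        rw [List.foldr_append, lwlFoldr_children]
        congr 1
        simp only [hrem]
        rw [lwlCands_succ _ _ _ _ _ hvp, List.foldl_append]
        congr 1
        by_cases hve : v = e <;> simp [hve, lwlUpd]

lemma lwlGraph_len (W : List String) :
    ∀ v, ((lwlGraph W).getD v []).length ≤ lwlDictSize (lwlGraph W) := by
  intro v
  rw [PySem.Dict.getD_eq_get?_getD]
  cases h : (lwlGraph W).get? v with
  | none => simp
  | some l =>
    simp only [Option.getD_some]
    have hmem : l ∈ (lwlGraph W).values := by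
      have hit := PySem.Dict.mem_items_of_get?_eq_some _ h
      simp only [PySem.Dict.values]
      exact List.mem_map.mpr ⟨(v, l), hit, rfl⟩
    unfold lwlDictSize
    exact List.single_le_sum (fun x _ => Nat.zero_le x) _ (List.mem_map.mpr ⟨l, hmem, rfl⟩)

lemma lwl_core (W : List String) (hW : 2 ≤ W.length) :
    lwlLoopA (lwlGraph W) ((W.length : Int) - 1) ((lwlDictSize (lwlGraph W) + 2) ^ (W.length + 2)) [((0 : Int), ([] : List Int))] []
      = lwlDfsB W ((W.length : Int) - 1) (W.length + 2) 0 [] [] := by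
  have hsubA : ∀ v u, u ∈ (lwlGraph W).getD v [] → u ∈ PySem.List.pyRange 0 (W.length : Int) 1 :=
    lwlGraph_sub W
  have hsubAR : ∀ v u, u ∈ ((lwlGraph W).getD v []).reverse → u ∈ PySem.List.pyRange 0 (W.length : Int) 1 :=
    fun v u hu => hsubA v u (List.mem_reverse.mp hu)
  have hC := lwlGraph_len W
  have h0 : (0 : Int) ∈ PySem.List.pyRange 0 (W.length : Int) 1 := by
    rw [PySem.List.mem_pyRange_one]
    omega
  have hrem0 : lwlRem (W.length : Int) ([] : List Int) = W.length := by
    rw [lwlRem_nil]; simp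
  have hfuelA : lwlMsr (W.length : Int) (lwlDictSize (lwlGraph W)) [((0 : Int), ([] : List Int))]
      < (lwlDictSize (lwlGraph W) + 2) ^ (W.length + 2) := by
    have h1 : lwlMsr (W.length : Int) (lwlDictSize (lwlGraph W)) [((0 : Int), ([] : List Int))]
        = (lwlDictSize (lwlGraph W) + 1) ^ W.length := by
      simp [lwlMsr, hrem0]
    rw [h1]
    calc (lwlDictSize (lwlGraph W) + 1) ^ W.length
        ≤ (lwlDictSize (lwlGraph W) + 2) ^ W.length := Nat.pow_le_pow_left (by omega) _
      _ < (lwlDictSize (lwlGraph W) + 2) ^ (W.length + 2) :=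
          Nat.pow_lt_pow_right (by omega) (by omega)
  rw [lwlLoopA_eq (lwlGraph W) ((W.length : Int) - 1) (W.length : Int) (lwlDictSize (lwlGraph W)) hC hsubA _ _ _
    (by intro fr hfr; simp only [List.mem_singleton] at hfr; subst hfr; exact h0) hfuelA]
  rw [lwlDfsB_eq W ((W.length : Int) - 1) _ _ _ _ h0 (by rw [hrem0]; omega)]
  congr 1
  simp only [List.foldr_cons, List.foldr_nil]
  rw [hrem0]
  have hcongr : lwlCands (fun v => (lwlGraph W).getD v []) ((W.length : Int) - 1) (W.length + 1) 0 []
      = lwlCands (lwlNbrs W) ((W.length : Int) - 1) (W.length + 1) 0 [] :=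
    lwlCands_congr (fun v => (lwlGraph W).getD v []) (lwlNbrs W) ((W.length : Int) - 1) (W.length : Int)
      (fun v hv => lwlGraph_nbrs W v hv) (fun v u hu => lwlNbrs_sub W v u hu) (W.length + 1) 0 [] h0
  have hfuel : lwlCands (lwlNbrs W) ((W.length : Int) - 1) (W.length + 1) 0 []
      = lwlCands (lwlNbrs W) ((W.length : Int) - 1) (W.length + 2) 0 [] :=
    lwlCands_fuel (lwlNbrs W) ((W.length : Int) - 1) (W.length : Int)
      (fun v u hu => lwlNbrs_sub W v u hu)
      (W.length + 1) (W.length + 2) 0 [] h0 (by rw [hrem0]; omega) (by rw [hrem0]; omega)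
  rw [← hfuel, ← hcongr]
  exact List.Perm.foldl_eq (f := lwlUpd) (rcomm := ⟨lwlUpd_comm⟩)
    (lwlCands_perm (fun v => (lwlGraph W).getD v []) ((W.length : Int) - 1) (W.length + 1) 0 []) []

-- ===== VERDICT (by name: the statement is the Claim_ definition above) =====
theorem longestWordLadder_spec : Claim_equal_longestWordLadder := by
  intro s e w _ _
  unfold Spec_longestWordLadder longestWordLadder longestWordLadder_alt
  have hW : 2 ≤ ([s] ++ PySem.List.sorted w (fun x => x) false ++ [e]).length := by
    simp
  simp only [lwl_core _ hW]
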